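-- pv_equiv track=rewrite | github.com/doesamancode/atlas | src/agents/validation_agent.py | infer_trip_region
-- ===== SOURCE A (Python) =====
-- def infer_trip_region(destinations):
--     """
--     Very simple heuristic to classify trip type based on destination names.
--     If any destination matches long-haul keywords → long_haul
--     Else if any matches Asia/Middle-East → asia
--     Else → domestic (India assumed as base)
--     """
--     if not destinations:
--         return "domestic"
--
--     long_haul_keywords = {
--         # Countries / regions
--         "canada", "usa", "united states", "america", "uk", "england", "britain",
--         "london", "france", "paris", "germany", "berlin", "italy", "rome",
--         "spain", "madrid", "barcelona", "switzerland", "zurich", "geneva",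
--         "netherlands", "amsterdam", "belgium", "australia", "sydney", "melbourne",
--         "new zealand", "auckland", "toronto", "vancouver", "los angeles",
--         "new york", "san francisco", "boston", "chicago", "mauritius"
--     }
--
--     asia_keywords = {
--         "singapore", "thailand", "bangkok", "phuket", "krabi",
--         "malaysia", "kuala lumpur", "indonesia", "bali",
--         "vietnam", "hanoi", "ho chi minh",
--         "sri lanka", "colombo",
--         "nepal", "kathmandu",
--         "bhutan",
--         "maldives",
--         "qatar", "doha",
--         "dubai", "uae", "abu dhabi",
--         "hong kong", "japan", "tokyo", "osaka",
--         "china", "beijing", "shanghai"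
--     }
--
--     # First pass: long-haul detection
--     for dest in destinations:
--         d = dest.lower()
--         if any(kw in d for kw in long_haul_keywords):
--             return "long_haul"
--
--     # Second pass: Asia / nearby
--     for dest in destinations:
--         d = dest.lower()
--         if any(kw in d for kw in asia_keywords):
--             return "asia"
--
--     # Fallback: assume domestic (India)
--     return "domestic"
-- ===== SOURCE B (Python) =====
-- # One flat keyword->score table (2 = long_haul, 1 = asia); the answer is the
-- # maximum score seen over all destinations, decoded at the end.
-- KEYWORD_SCORES = [
--     ("canada", 2),
--     ("usa", 2),
--     ("united states", 2),
--     ("america", 2),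
--     ("uk", 2),
--     ("england", 2),
--     ("britain", 2),
--     ("london", 2),
--     ("france", 2),
--     ("paris", 2),
--     ("germany", 2),
--     ("berlin", 2),
--     ("italy", 2),
--     ("rome", 2),
--     ("spain", 2),
--     ("madrid", 2),
--     ("barcelona", 2),
--     ("switzerland", 2),
--     ("zurich", 2),
--     ("geneva", 2),
--     ("netherlands", 2),
--     ("amsterdam", 2),
--     ("belgium", 2),
--     ("australia", 2),
--     ("sydney", 2),
--     ("melbourne", 2),
--     ("new zealand", 2),
--     ("auckland", 2),
--     ("toronto", 2),
--     ("vancouver", 2),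
--     ("los angeles", 2),
--     ("new york", 2),
--     ("san francisco", 2),
--     ("boston", 2),
--     ("chicago", 2),
--     ("mauritius", 2),
--     ("singapore", 1),
--     ("thailand", 1),
--     ("bangkok", 1),
--     ("phuket", 1),
--     ("krabi", 1),
--     ("malaysia", 1),
--     ("kuala lumpur", 1),
--     ("indonesia", 1),
--     ("bali", 1),
--     ("vietnam", 1),
--     ("hanoi", 1),
--     ("ho chi minh", 1),
--     ("sri lanka", 1),
--     ("colombo", 1),
--     ("nepal", 1),
--     ("kathmandu", 1),
--     ("bhutan", 1),
--     ("maldives", 1),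
--     ("qatar", 1),
--     ("doha", 1),
--     ("dubai", 1),
--     ("uae", 1),
--     ("abu dhabi", 1),
--     ("hong kong", 1),
--     ("japan", 1),
--     ("tokyo", 1),
--     ("osaka", 1),
--     ("china", 1),
--     ("beijing", 1),
--     ("shanghai", 1),
-- ]
--
-- _LABELS = ("domestic", "asia", "long_haul")
--
--
-- def infer_trip_region(destinations):
--     """Max-score classification: score each destination by the best-matching
--     keyword and decode the overall maximum into a region label."""
--     best = 0
--     for dest in destinations:
--         d = dest.lower()
--         for kw, sc in KEYWORD_SCORES:
--             if kw in d:
--                 best = max(best, sc)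
--     return _LABELS[best]
-- ===== Notes on version B (the rewrite author's own statement) =====
-- stated objective: alternative
-- what changed: Replaces A's two staged scans over two keyword sets with a single flat keyword-to-score table (2 = long_haul, 1 = asia); B keeps a running maximum score over all destinations and decodes the maximum into a label at the end.
import Mathlib
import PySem

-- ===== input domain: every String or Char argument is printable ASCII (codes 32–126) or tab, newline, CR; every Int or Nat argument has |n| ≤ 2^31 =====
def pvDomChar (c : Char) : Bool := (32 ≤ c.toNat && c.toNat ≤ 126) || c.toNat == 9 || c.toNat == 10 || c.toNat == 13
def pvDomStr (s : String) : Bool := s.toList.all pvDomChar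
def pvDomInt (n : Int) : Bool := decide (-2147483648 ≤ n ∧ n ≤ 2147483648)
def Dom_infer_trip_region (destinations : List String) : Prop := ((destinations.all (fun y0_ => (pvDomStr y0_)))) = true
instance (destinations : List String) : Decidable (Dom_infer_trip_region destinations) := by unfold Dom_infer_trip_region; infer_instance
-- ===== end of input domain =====

-- B replaces A's two staged keyword-set scans with a single flat keyword→score
-- table and a running maximum score decoded into a label (objective: simpler).

-- ===== PORT A =====
def pvA_long_haul_keywords : PySem.Set String := PySem.Set.ofList
  ["canada", "usa", "united states", "america", "uk", "england", "britain",
   "london", "france", "paris", "germany", "berlin", "italy", "rome",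
   "spain", "madrid", "barcelona", "switzerland", "zurich", "geneva",
   "netherlands", "amsterdam", "belgium", "australia", "sydney", "melbourne",
   "new zealand", "auckland", "toronto", "vancouver", "los angeles",
   "new york", "san francisco", "boston", "chicago", "mauritius"]

def pvA_asia_keywords : PySem.Set String := PySem.Set.ofList
  ["singapore", "thailand", "bangkok", "phuket", "krabi",
   "malaysia", "kuala lumpur", "indonesia", "bali",
   "vietnam", "hanoi", "ho chi minh",
   "sri lanka", "colombo",
   "nepal", "kathmandu",
   "bhutan",
   "maldives",
   "qatar", "doha",
   "dubai", "uae", "abu dhabi",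
   "hong kong", "japan", "tokyo", "osaka",
   "china", "beijing", "shanghai"]

def infer_trip_region (destinations : List String) : String :=
  if destinations = [] then "domestic"
  else if destinations.any (fun dest =>
         pvA_long_haul_keywords.any (fun kw => PySem.Str.isIn kw (PySem.Str.lower dest))) then
    "long_haul"
  else if destinations.any (fun dest =>
         pvA_asia_keywords.any (fun kw => PySem.Str.isIn kw (PySem.Str.lower dest))) then
    "asia"
  else
    "domestic"

-- ===== PORT B =====
def pvB_keyword_scores : List (String × Nat) := [
  ("canada", 2),
  ("usa", 2),
  ("united states", 2),
  ("america", 2),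
  ("uk", 2),
  ("england", 2),
  ("britain", 2),
  ("london", 2),
  ("france", 2),
  ("paris", 2),
  ("germany", 2),
  ("berlin", 2),
  ("italy", 2),
  ("rome", 2),
  ("spain", 2),
  ("madrid", 2),
  ("barcelona", 2),
  ("switzerland", 2),
  ("zurich", 2),
  ("geneva", 2),
  ("netherlands", 2),
  ("amsterdam", 2),
  ("belgium", 2),
  ("australia", 2),
  ("sydney", 2),
  ("melbourne", 2),
  ("new zealand", 2),
  ("auckland", 2),
  ("toronto", 2),
  ("vancouver", 2),
  ("los angeles", 2),
  ("new york", 2),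
  ("san francisco", 2),
  ("boston", 2),
  ("chicago", 2),
  ("mauritius", 2),
  ("singapore", 1),
  ("thailand", 1),
  ("bangkok", 1),
  ("phuket", 1),
  ("krabi", 1),
  ("malaysia", 1),
  ("kuala lumpur", 1),
  ("indonesia", 1),
  ("bali", 1),
  ("vietnam", 1),
  ("hanoi", 1),
  ("ho chi minh", 1),
  ("sri lanka", 1),
  ("colombo", 1),
  ("nepal", 1),
  ("kathmandu", 1),
  ("bhutan", 1),
  ("maldives", 1),
  ("qatar", 1),
  ("doha", 1),
  ("dubai", 1),
  ("uae", 1),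
  ("abu dhabi", 1),
  ("hong kong", 1),
  ("japan", 1),
  ("tokyo", 1),
  ("osaka", 1),
  ("china", 1),
  ("beijing", 1),
  ("shanghai", 1)
]

def pvB_labels : List String := ["domestic", "asia", "long_haul"]

-- _LABELS[best]: best is always 0/1/2 here, so the total getD is exact (index in range).
def infer_trip_region_alt (destinations : List String) : String :=
  let best : Nat := destinations.foldl (fun best dest =>
    let d := PySem.Str.lower dest
    pvB_keyword_scores.foldl (fun b p => if PySem.Str.isIn p.1 d then max b p.2 else b) best) 0
  pvB_labels.getD best "domestic"

-- ===== PRECONDITION & SPEC =====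
def Spec_infer_trip_region (destinations : List String) (out : String) : Prop := out = infer_trip_region_alt destinations
instance (destinations : List String) (out : String) : Decidable (Spec_infer_trip_region destinations out) := by unfold Spec_infer_trip_region; infer_instance

-- ===== CLAIM (what is proved, stated in full; the proofs are below) =====
def Claim_equal_infer_trip_region : Prop := ∀ (destinations : List String), Dom_infer_trip_region destinations → Spec_infer_trip_region destinations (infer_trip_region destinations)

-- ===== LEMMAS AND PROOFS =====

-- the score table is the two keyword lists tagged with their scores
set_option maxRecDepth 4000 in
theorem scores_split :
    pvB_keyword_scores =
      pvA_long_haul_keywords.map (fun s => (s, 2)) ++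
      pvA_asia_keywords.map (fun s => (s, 1)) := by decide

-- turn the inner foldl into a foldr-maximum
theorem inner_foldl_eq (d : String) (L : List (String × Nat)) : ∀ (a : Nat),
    L.foldl (fun b p => if PySem.Str.isIn p.1 d then max b p.2 else b) a
      = max a (L.foldr (fun p r => max (if PySem.Str.isIn p.1 d then p.2 else 0) r) 0) := by
  induction L with
  | nil => intro a; simp
  | cons x t ih =>
      intro a
      simp only [List.foldl_cons, List.foldr_cons, ih]
      split <;> omega

-- Boolean/arithmetic step facts used by the foldr/foldl characterisations
theorem pv_max_block (p q : Bool) (c b : Nat) :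
    max (if p = true then c else 0) (if q = true then max c b else b)
      = if (p || q) = true then max c b else b := by
  cases p <;> cases q <;> simp

theorem pv_score_norm (pL pA : Bool) :
    (if pL = true then max 2 (if pA = true then max 1 0 else 0)
     else if pA = true then max 1 0 else 0)
      = if pL = true then 2 else if pA = true then 1 else 0 := by
  cases pL <;> cases pA <;> simp

theorem pv_outer_step (pL pA qL qA : Bool) (a : Nat) :
    max (max a (if pL = true then 2 else if pA = true then 1 else 0))
        (if qL = true then 2 else if qA = true then 1 else 0)
      = max a (if (pL || qL) = true then 2 else if (pA || qA) = true then 1 else 0) := by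
  cases pL <;> cases pA <;> cases qL <;> cases qA <;> simp

-- the foldr-maximum of a constant-score block
theorem block_foldr_eq (d : String) (c : Nat) (l : List String) : ∀ (b : Nat),
    (l.map (fun s => (s, c))).foldr
        (fun p r => max (if PySem.Str.isIn p.1 d then p.2 else 0) r) b
      = if l.any (fun kw => PySem.Str.isIn kw d) then max c b else b := by
  induction l with
  | nil => intro b; simp
  | cons x t ih =>
      intro b
      simp only [List.map_cons, List.foldr_cons, List.any_cons, ih]
      exact pv_max_block _ _ _ _

def pvScore (d : String) : Nat :=
  if pvA_long_haul_keywords.any (fun kw => PySem.Str.isIn kw d) then 2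
  else if pvA_asia_keywords.any (fun kw => PySem.Str.isIn kw d) then 1
  else 0

theorem inner_eq_score (d : String) (a : Nat) :
    pvB_keyword_scores.foldl (fun b p => if PySem.Str.isIn p.1 d then max b p.2 else b) a
      = max a (pvScore d) := by
  rw [inner_foldl_eq, scores_split, List.foldr_append, block_foldr_eq, block_foldr_eq,
    pv_score_norm, pvScore]

theorem outer_eq (ds : List String) : ∀ (a : Nat),
    ds.foldl (fun best dest =>
        let d := PySem.Str.lower dest
        pvB_keyword_scores.foldl (fun b p => if PySem.Str.isIn p.1 d then max b p.2 else b) best) a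
      = max a
        (if ds.any (fun dest => pvA_long_haul_keywords.any
              (fun kw => PySem.Str.isIn kw (PySem.Str.lower dest))) then 2
         else if ds.any (fun dest => pvA_asia_keywords.any
              (fun kw => PySem.Str.isIn kw (PySem.Str.lower dest))) then 1
         else 0) := by
  induction ds with
  | nil => intro a; simp
  | cons x t ih =>
      intro a
      simp only [List.foldl_cons, List.any_cons]
      rw [ih, inner_eq_score, pvScore]
      exact pv_outer_step _ _ _ _ _

-- ===== VERDICT (by name: the statement is the Claim_ definition above) =====
theorem infer_trip_region_spec : Claim_equal_infer_trip_region := by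
  intro destinations _
  unfold Spec_infer_trip_region infer_trip_region infer_trip_region_alt
  simp only [outer_eq, Nat.zero_max]
  by_cases hnil : destinations = []
  · subst hnil; simp [pvB_labels]
  · simp only [if_neg hnil]
    cases hL : destinations.any (fun dest => pvA_long_haul_keywords.any
        (fun kw => PySem.Str.isIn kw (PySem.Str.lower dest))) <;>
      cases hA : destinations.any (fun dest => pvA_asia_keywords.any
          (fun kw => PySem.Str.isIn kw (PySem.Str.lower dest))) <;>
        simp [pvB_labels]
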